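-- pv_equiv track=rewrite | github.com/Smegalex/TA.Lab2 | src/main.py | calculateRanking
-- ===== SOURCE A (Python) =====
-- def sortAndCountInv(arr):
--     if len(arr) <= 1:
--         return arr, 0
--     else:
--         mid = len(arr) // 2
--         left_half, left_inversions = sortAndCountInv(arr[:mid])
--         right_half, right_inversions = sortAndCountInv(arr[mid:])
--         merged_arr, split_inversions = mergeAndCountSplitInv(
--             left_half, right_half)
--         inversions = left_inversions + right_inversions + split_inversions
--         return merged_arr, inversions
--
-- def mergeAndCountSplitInv(left, right):
--     merged = []
--     split_inversions = 0
--     i, j = 0, 0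
--     while i < len(left) and j < len(right):
--         if left[i] <= right[j]:
--             merged.append(left[i])
--             i += 1
--         else:
--             merged.append(right[j])
--             split_inversions += len(left) - i
--             j += 1
--     merged += left[i:]
--     merged += right[j:]
--     return merged, split_inversions
--
-- def countInversions(arr):
--     _, inversions = sortAndCountInv(arr)
--     return inversions
--
-- def sortAccording(arr: list, accordingTo: list) -> dict:
--     dic = sorted(dict(zip(accordingTo, arr)).items())
--     returnable = {k: v for k, v in dic}
--     return returnable
--
-- def calculateRanking(matrix, compareTo):
--     compareTo += -1
--     rankings = []
--     accordingTo = matrix[compareTo][1:]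
--     for i in range(len(matrix)):
--         if (i == compareTo):
--             continue
--         person_preferences = list(sortAccording(
--             matrix[i][1:], accordingTo).values())
--         inversions = countInversions(person_preferences)
--         rankings.append((i+1, inversions))
--     rankings.sort(key=lambda x: x[1])
--     return rankings
-- ===== SOURCE B (Python) =====
-- def countInv(arr):
--     total = 0
--     rest = arr
--     while rest:
--         head, rest = rest[0], rest[1:]
--         total += sum(1 for y in rest if head > y)
--     return total
--
-- def calculateRanking(matrix, compareTo):
--     ref = matrix[compareTo - 1][1:]
--     results = []
--     for idx, row in enumerate(matrix, start=1):
--         if idx == compareTo: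
--             continue
--         order = sorted(dict(zip(ref, row[1:])).items())
--         results.append((idx, countInv([v for _, v in order])))
--     return sorted(results, key=lambda p: p[1])
-- ===== Notes on version B (the rewrite author's own statement) =====
-- stated objective: simpler
-- what changed: Replaces the recursive merge-sort inversion machinery (sortAndCountInv/mergeAndCountSplitInv) with a direct one-loop pair count (for each head, count later smaller elements), and drops the second dict rebuild by reading the values straight off the sorted items list.
import Mathlib
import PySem

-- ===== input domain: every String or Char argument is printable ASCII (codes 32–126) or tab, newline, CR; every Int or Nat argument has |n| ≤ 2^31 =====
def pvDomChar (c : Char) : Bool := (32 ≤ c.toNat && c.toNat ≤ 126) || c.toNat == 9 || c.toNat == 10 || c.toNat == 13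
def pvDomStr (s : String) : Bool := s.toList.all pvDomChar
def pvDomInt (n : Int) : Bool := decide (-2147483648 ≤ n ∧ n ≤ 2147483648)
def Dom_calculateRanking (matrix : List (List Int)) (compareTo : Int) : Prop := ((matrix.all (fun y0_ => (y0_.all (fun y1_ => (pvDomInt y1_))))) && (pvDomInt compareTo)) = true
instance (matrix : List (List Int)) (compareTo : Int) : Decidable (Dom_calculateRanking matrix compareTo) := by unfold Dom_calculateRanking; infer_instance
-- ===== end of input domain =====

-- B replaces the merge-sort inversion counter with a direct count of out-of-order pairs and reads the
-- ranked values straight off the sorted items list (no second dict rebuild); objective: simpler, not faster.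


-- ===== PORT A =====
-- mergeAndCountSplitInv: the while loop over indices i, j becomes the obvious structural
-- recursion consuming the two lists; 'len(left) - i' is the length of the remaining left list.
def mergeCnt : List Int → List Int → List Int × Int
  | [], r => (r, 0)
  | l, [] => (l, 0)
  | x :: l, y :: r =>
    if x ≤ y then
      let p := mergeCnt l (y :: r)
      (x :: p.1, p.2)
    else
      let p := mergeCnt (x :: l) r
      (y :: p.1, p.2 + ((x :: l).length : Int))
termination_by l r => l.length + r.length
decreasing_by all_goals simp [List.length_cons]

-- sortAndCountInv
def sac (arr : List Int) : List Int × Int :=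
  if _h : arr.length ≤ 1 then (arr, 0)
  else
    let mid : Nat := arr.length / 2
    let pl := sac (PySem.List.slice arr none (some (mid : Int)))
    let pr := sac (PySem.List.slice arr (some (mid : Int)) none)
    let pm := mergeCnt pl.1 pr.1
    (pm.1, pl.2 + pr.2 + pm.2)
termination_by arr.length
decreasing_by
  · rw [PySem.List.slice_to_natCast]; simp [List.length_take]; omega
  · rw [PySem.List.slice_from_natCast]; simp [List.length_drop]; omega

def countInversions (arr : List Int) : Int := (sac arr).2

def sortAccording (arr : List Int) (accordingTo : List Int) : PySem.Dict Int Int :=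
  let dic := PySem.List.sorted2 (PySem.Dict.ofList (accordingTo.zip arr)).items (fun p => p.1) (fun p => p.2) false
  PySem.Dict.ofList dic

def calculateRanking (matrix : List (List Int)) (compareTo : Int) : List (Int × Int) :=
  let c := compareTo + (-1)
  let accordingTo := PySem.List.slice (PySem.List.pyGetD matrix c []) (some 1) none
  let rankings := (PySem.List.pyRange 0 (matrix.length : Int) 1).foldl (fun acc i =>
    if i = c then acc
    else acc ++ [(i + 1, countInversions
      (sortAccording (PySem.List.slice (PySem.List.pyGetD matrix i []) (some 1) none) accordingTo).values)]) []
  PySem.List.sorted rankings (fun p => p.2) false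

-- ===== PORT B =====
-- countInv: the while loop peeling 'head' off 'rest'; 'total' is the accumulator.
def countInvGo : Int → List Int → Int
  | total, [] => total
  | total, head :: rest => countInvGo (total + (rest.countP (fun y => decide (y < head)) : Int)) rest

def countInvAlt (arr : List Int) : Int := countInvGo 0 arr

def calculateRanking_alt (matrix : List (List Int)) (compareTo : Int) : List (Int × Int) :=
  let ref := PySem.List.slice (PySem.List.pyGetD matrix (compareTo - 1) []) (some 1) none
  let results := (PySem.List.enumerate matrix 1).foldl (fun acc p =>
    if p.1 = compareTo then acc
    else acc ++ [(p.1, countInvAlt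
      ((PySem.List.sorted2 (PySem.Dict.ofList (ref.zip (PySem.List.slice p.2 (some 1) none))).items
        (fun q => q.1) (fun q => q.2) false).map (fun q => q.2)))]) []
  PySem.List.sorted results (fun p => p.2) false

-- ===== PRECONDITION & SPEC =====
-- A raises IndexError iff matrix[compareTo - 1] is out of range (Python's negative indexing included).
def Pre_calculateRanking (matrix : List (List Int)) (compareTo : Int) : Prop :=
  -(matrix.length : Int) ≤ compareTo - 1 ∧ compareTo - 1 < (matrix.length : Int)
instance (matrix : List (List Int)) (compareTo : Int) : Decidable (Pre_calculateRanking matrix compareTo) := by unfold Pre_calculateRanking; infer_instance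
def pvWitness_calculateRanking : List (List Int) × Int := ([[1, 1, 2, 3], [2, 3, 1, 2]], 1)

def Spec_calculateRanking (matrix : List (List Int)) (compareTo : Int) (out : List (Int × Int)) : Prop := out = calculateRanking_alt matrix compareTo
instance (matrix : List (List Int)) (compareTo : Int) (out : List (Int × Int)) : Decidable (Spec_calculateRanking matrix compareTo out) := by unfold Spec_calculateRanking; infer_instance

-- ===== CLAIM (what is proved, stated in full; the proofs are below) =====
def Claim_equal_calculateRanking : Prop := ∀ (matrix : List (List Int)) (compareTo : Int), Dom_calculateRanking matrix compareTo → Pre_calculateRanking matrix compareTo → Spec_calculateRanking matrix compareTo (calculateRanking matrix compareTo)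

-- ===== LEMMAS AND PROOFS =====

-- clean recursion for the pair count
def pvInv : List Int → Int
  | [] => 0
  | x :: t => (t.countP (fun y => decide (y < x)) : Int) + pvInv t

-- number of pairs (x from l, y from r) with y < x
def pvCross (l r : List Int) : Int := (l.map (fun x => (r.countP (fun y => decide (y < x)) : Int))).sum

theorem countInvGo_eq (l : List Int) : ∀ t, countInvGo t l = t + pvInv l := by
  induction l with
  | nil => intro t; simp [countInvGo, pvInv]
  | cons x s ih => intro t; simp [countInvGo, pvInv, ih]; try ring

theorem pvCross_nil_right (l : List Int) : pvCross l [] = 0 := by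
  induction l with
  | nil => rfl
  | cons x s ih => simp [pvCross] at ih ⊢; try exact ih

theorem pvCross_cons_right (l : List Int) (y : Int) (r : List Int) :
    pvCross l (y :: r) = (l.countP (fun x => decide (y < x)) : Int) + pvCross l r := by
  induction l with
  | nil => simp [pvCross]
  | cons x s ih =>
    simp only [pvCross, List.map_cons, List.sum_cons, List.countP_cons] at ih ⊢
    rw [ih]
    by_cases h : y < x
    · simp [h]
      try push_cast
      try ring
      try omega
    · simp [h]
      try push_cast
      try ring
      try omega

theorem pvCross_perm_left {l l' : List Int} (r : List Int) (h : l.Perm l') :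
    pvCross l r = pvCross l' r :=
  List.Perm.sum_eq (h.map _)

theorem pvCross_perm_right (l : List Int) {r r' : List Int} (h : r.Perm r') :
    pvCross l r = pvCross l r' := by
  unfold pvCross
  exact congrArg List.sum (List.map_congr_left (fun x _ => by rw [h.countP_eq]))

theorem pvInv_append (l r : List Int) : pvInv (l ++ r) = pvInv l + pvInv r + pvCross l r := by
  induction l with
  | nil => simp [pvInv, pvCross]
  | cons x s ih =>
    simp [pvInv, List.countP_append, pvCross, List.sum_cons] at ih ⊢
    rw [ih]
    try push_cast
    ring

theorem mergeCnt_go : ∀ (n : Nat) (l r : List Int), l.length + r.length ≤ n →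
    l.Pairwise (· ≤ ·) → r.Pairwise (· ≤ ·) →
    (mergeCnt l r).1.Perm (l ++ r) ∧ (mergeCnt l r).1.Pairwise (· ≤ ·) ∧
      (mergeCnt l r).2 = pvCross l r := by
  intro n
  induction n with
  | zero =>
    intro l r hlen hl hr
    cases l with
    | cons a t => simp at hlen
    | nil =>
      cases r with
      | cons b t => simp at hlen
      | nil => exact ⟨by simp [mergeCnt], by simp [mergeCnt], by simp [mergeCnt, pvCross]⟩
  | succ n ih =>
    intro l r hlen hl hr
    cases l with
    | nil => exact ⟨by simp [mergeCnt], by simpa [mergeCnt] using hr, by simp [mergeCnt, pvCross]⟩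
    | cons x l =>
      cases r with
      | nil =>
        exact ⟨by simp [mergeCnt], by simpa [mergeCnt] using hl,
          by simp [mergeCnt, pvCross_nil_right]⟩
      | cons y r =>
        obtain ⟨hx, hl'⟩ := List.pairwise_cons.mp hl
        obtain ⟨hy, hr'⟩ := List.pairwise_cons.mp hr
        by_cases hxy : x ≤ y
        · obtain ⟨IH1, IH2, IH3⟩ := ih l (y :: r) (by simp at hlen ⊢; omega) hl' hr
          have key : mergeCnt (x :: l) (y :: r)
              = (x :: (mergeCnt l (y :: r)).1, (mergeCnt l (y :: r)).2) := by
            simp [mergeCnt, hxy]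
          rw [key]
          refine ⟨IH1.cons x, ?_, ?_⟩
          · refine List.pairwise_cons.mpr ⟨?_, IH2⟩
            intro z hz
            have hz' := (IH1.mem_iff).mp hz
            simp only [List.mem_append, List.mem_cons] at hz'
            rcases hz' with h | rfl | h
            · exact hx z h
            · exact hxy
            · exact le_trans hxy (hy z h)
          · have h0 : (y :: r).countP (fun v => decide (v < x)) = 0 := by
              rw [List.countP_eq_zero]
              intro a ha
              rcases List.mem_cons.mp ha with rfl | ha
              · simp; omega
              · have := hy a ha; simp; omega
            simp [pvCross, IH3, h0]
        · obtain ⟨IH1, IH2, IH3⟩ := ih (x :: l) r (by simp at hlen ⊢; omega) hl hr'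
          have key : mergeCnt (x :: l) (y :: r)
              = (y :: (mergeCnt (x :: l) r).1,
                 (mergeCnt (x :: l) r).2 + ((x :: l).length : Int)) := by
            simp [mergeCnt, hxy]
          rw [key]
          refine ⟨?_, ?_, ?_⟩
          · exact (IH1.cons y).trans List.perm_middle.symm
          · refine List.pairwise_cons.mpr ⟨?_, IH2⟩
            intro z hz
            have hz' := (IH1.mem_iff).mp hz
            simp only [List.cons_append, List.mem_cons, List.mem_append] at hz'
            rcases hz' with rfl | h | h
            · omega
            · have := hx z h; omega
            · exact hy z h
          · have hlen' : (x :: l).countP (fun v => decide (y < v)) = (x :: l).length := by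
              rw [List.countP_eq_length]
              intro a ha
              rcases List.mem_cons.mp ha with rfl | ha
              · simp; omega
              · have := hx a ha; simp; omega
            rw [pvCross_cons_right, IH3, hlen']
            ring

theorem mergeCnt_spec (l r : List Int) (hl : l.Pairwise (· ≤ ·)) (hr : r.Pairwise (· ≤ ·)) :
    (mergeCnt l r).1.Perm (l ++ r) ∧ (mergeCnt l r).1.Pairwise (· ≤ ·) ∧
      (mergeCnt l r).2 = pvCross l r :=
  mergeCnt_go (l.length + r.length) l r (le_refl _) hl hr

theorem sac_go : ∀ (n : Nat) (arr : List Int), arr.length ≤ n →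
    (sac arr).1.Perm arr ∧ (sac arr).1.Pairwise (· ≤ ·) ∧ (sac arr).2 = pvInv arr := by
  intro n
  induction n with
  | zero =>
    intro arr hlen
    cases arr with
    | cons a t => simp at hlen
    | nil => exact ⟨by simp [sac], by simp [sac], by simp [sac, pvInv]⟩
  | succ n ih =>
    intro arr hlen
    by_cases h : arr.length ≤ 1
    · have hs : sac arr = (arr, 0) := by rw [sac]; simp [h]
      rw [hs]
      rcases arr with _ | ⟨a, _ | ⟨b, t⟩⟩
      · exact ⟨List.Perm.refl _, by simp, by simp [pvInv]⟩
      · exact ⟨List.Perm.refl _, by simp, by simp [pvInv]⟩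
      · simp at h
    · have hs : sac arr
          = ((mergeCnt (sac (arr.take (arr.length / 2))).1 (sac (arr.drop (arr.length / 2))).1).1,
             (sac (arr.take (arr.length / 2))).2 + (sac (arr.drop (arr.length / 2))).2 +
             (mergeCnt (sac (arr.take (arr.length / 2))).1 (sac (arr.drop (arr.length / 2))).1).2) := by
        rw [sac, dif_neg h]
        simp only [PySem.List.slice_to_natCast, PySem.List.slice_from_natCast]
      obtain ⟨a1, a2, a3⟩ := ih (arr.take (arr.length / 2)) (by simp [List.length_take]; omega)
      obtain ⟨b1, b2, b3⟩ := ih (arr.drop (arr.length / 2)) (by simp [List.length_drop]; omega)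
      obtain ⟨m1, m2, m3⟩ := mergeCnt_spec _ _ a2 b2
      have hsplit : arr.take (arr.length / 2) ++ arr.drop (arr.length / 2) = arr :=
        List.take_append_drop _ _
      have hpermTD : (arr.take (arr.length / 2) ++ arr.drop (arr.length / 2)).Perm arr := by
        rw [hsplit]
      rw [hs]
      refine ⟨m1.trans ((a1.append b1).trans hpermTD), m2, ?_⟩
      have hcross : (mergeCnt (sac (arr.take (arr.length / 2))).1
          (sac (arr.drop (arr.length / 2))).1).2
          = pvCross (arr.take (arr.length / 2)) (arr.drop (arr.length / 2)) := by
        rw [m3, pvCross_perm_left _ a1, pvCross_perm_right _ b1]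
      have happ := pvInv_append (arr.take (arr.length / 2)) (arr.drop (arr.length / 2))
      rw [hsplit] at happ
      rw [a3, b3, hcross]
      omega

theorem sac_spec (arr : List Int) :
    (sac arr).1.Perm arr ∧ (sac arr).1.Pairwise (· ≤ ·) ∧ (sac arr).2 = pvInv arr :=
  sac_go arr.length arr (le_refl _)

theorem countInversions_eq (l : List Int) : countInversions l = countInvAlt l := by
  have h := (sac_spec l).2.2
  simp [countInversions, countInvAlt, countInvGo_eq, h]

theorem values_ofList_of_nodup (ps : List (Int × Int)) (h : (ps.map Prod.fst).Nodup) :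
    (PySem.Dict.ofList ps).values = ps.map Prod.snd := by
  have hfresh : ∀ a ∈ ps, (PySem.Dict.empty : PySem.Dict Int Int).contains a.1 = false := by
    intro a _; exact PySem.Dict.contains_empty _
  have h2 := PySem.Dict.items_foldl_insert_fresh ps Prod.fst Prod.snd PySem.Dict.empty hfresh h
  show (PySem.Dict.empty.update ps).values = ps.map Prod.snd
  simp only [PySem.Dict.update, PySem.Dict.values]
  rw [show (fun (acc : PySem.Dict Int Int) (p : Int × Int) => acc.insert p.1 p.2)
        = (fun (d : PySem.Dict Int Int) (a : Int × Int) => d.insert a.1 a.2) from rfl]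
  rw [h2]
  rw [show (PySem.Dict.empty : PySem.Dict Int Int).items = [] from rfl]
  simp

theorem enumerate_shift {α : Type} (xs : List α) : ∀ s : Int,
    PySem.List.enumerate xs s = (PySem.List.enumerate xs 0).map (fun p => (p.1 + s, p.2)) := by
  induction xs with
  | nil => intro s; simp [PySem.List.enumerate]
  | cons x t ih =>
    intro s
    simp only [PySem.List.enumerate]
    rw [ih (s + 1), ih (0 + 1)]
    simp only [List.map_cons, List.map_map, Function.comp_def]
    congr 1
    · simp
    · refine List.map_congr_left (fun p _ => ?_)
      simp only [Prod.mk.injEq]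
      exact ⟨by ring, trivial⟩

theorem row_val (ref row : List Int) :
    countInversions (sortAccording row ref).values =
    countInvAlt ((PySem.List.sorted2 (PySem.Dict.ofList (ref.zip row)).items
      (fun q => q.1) (fun q => q.2) false).map (fun q => q.2)) := by
  have hperm := PySem.List.sorted2_perm (PySem.Dict.ofList (ref.zip row)).items
      (fun q : Int × Int => q.1) (fun q : Int × Int => q.2) false
  have h1 : (((PySem.Dict.ofList (ref.zip row)).items).map Prod.fst).Nodup := by
    have := PySem.Dict.nodup_keys_ofList (ref.zip row)
    simpa [PySem.Dict.keys] using this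
  have hnodup : ((PySem.List.sorted2 (PySem.Dict.ofList (ref.zip row)).items
      (fun q : Int × Int => q.1) (fun q : Int × Int => q.2) false).map Prod.fst).Nodup :=
    ((hperm.map Prod.fst).nodup_iff).mpr h1
  show countInversions (PySem.Dict.ofList _).values = _
  rw [values_ofList_of_nodup _ hnodup, countInversions_eq]

-- ===== VERDICT (by name: the statement is the Claim_ definition above) =====
theorem calculateRanking_spec : Claim_equal_calculateRanking := by
  intro matrix compareTo _ _
  show calculateRanking matrix compareTo = calculateRanking_alt matrix compareTo
  unfold calculateRanking calculateRanking_alt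
  dsimp only
  rw [show compareTo + (-1) = compareTo - 1 from by ring]
  congr 1
  rw [enumerate_shift matrix 1, List.foldl_map,
      PySem.List.enumerate_eq_map_pyRange matrix ([] : List Int), List.foldl_map]
  apply PySem.List.foldl_congr_mem
  intro acc p hp
  dsimp only
  by_cases hcase : p = compareTo - 1
  · simp [hcase]
  · have hne : ¬ (p + 1 = compareTo) := by omega
    rw [if_neg hcase, if_neg hne, row_val]
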